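-- pv_equiv track=rewrite | github.com/Gili-Levy/TAU-project6 | hw6_206962359.py | prefix_suffix_overlap_hash1
-- ===== SOURCE A (Python) =====
-- class Dict:
-- 	def __init__(self, m, hash_func=hash):
-- 		""" initial hash table, m empty entries """
-- 		self.table = [[] for i in range(m)]
-- 		self.hash_mod = lambda x: hash_func(x) % m
--
-- 	def __repr__(self):
-- 		L = [self.table[i] for i in range(len(self.table))]
-- 		return "".join([str(i) + " " + str(L[i]) + "\n" for i in range(len(self.table))])
--
-- 	def insert(self, key, value):
-- 		""" insert key,value into table
-- 			Allow repetitions of keys """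
-- 		i = self.hash_mod(key)  # hash on key only
-- 		item = [key, value]  # pack into one item
-- 		self.table[i].append(item)
--
-- 	def find(self, key):
-- 		""" returns ALL values of key as a list, empty list if none """
-- 		result_lst = []
-- 		i = self.hash_mod(key)
-- 		for curr in self.table[i]:
-- 			if curr[0] == key:
-- 				result_lst.append(curr[1])
-- 		return result_lst
--
-- def prefix_suffix_overlap_hash1(lst, k):
-- 	result_lst = []
-- 	d = Dict(len(lst))
--
-- 	# O(nk)
-- 	for i in range(len(lst)): # n iterations
-- 		d.insert(lst[i][:k],i) # O(k) - slicing, O(1) - insert(average)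
--
-- 	# O(nk)
-- 	for j in range(len(lst)): # n iterations
-- 		match_indexes = d.find(lst[j][-k:]) # O(k) - slicing, O(1) - find(average)
-- 		for index in match_indexes: # Q1-e: never happens
-- 			if index != j:
-- 				result_lst.append((index,j))
--
-- 	return result_lst # Q1-e: empty list
-- ===== SOURCE B (Python) =====
-- def prefix_suffix_overlap_hash1(lst, k):
-- 	result_lst = []
-- 	for j in range(len(lst)):
-- 		suffix = lst[j][-k:]
-- 		for i in range(len(lst)):
-- 			if i != j and lst[i][:k] == suffix:
-- 				result_lst.append((i, j))
-- 	return result_lst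
-- ===== Notes on version B (the rewrite author's own statement) =====
-- stated objective: simpler
-- what changed: Drops the custom hash table (bucket build then per-j lookup) and uses a direct nested double loop comparing each k-prefix lst[i][:k] against each k-suffix lst[j][-k:], reproducing A's output order (outer j, increasing i).
import Mathlib
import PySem

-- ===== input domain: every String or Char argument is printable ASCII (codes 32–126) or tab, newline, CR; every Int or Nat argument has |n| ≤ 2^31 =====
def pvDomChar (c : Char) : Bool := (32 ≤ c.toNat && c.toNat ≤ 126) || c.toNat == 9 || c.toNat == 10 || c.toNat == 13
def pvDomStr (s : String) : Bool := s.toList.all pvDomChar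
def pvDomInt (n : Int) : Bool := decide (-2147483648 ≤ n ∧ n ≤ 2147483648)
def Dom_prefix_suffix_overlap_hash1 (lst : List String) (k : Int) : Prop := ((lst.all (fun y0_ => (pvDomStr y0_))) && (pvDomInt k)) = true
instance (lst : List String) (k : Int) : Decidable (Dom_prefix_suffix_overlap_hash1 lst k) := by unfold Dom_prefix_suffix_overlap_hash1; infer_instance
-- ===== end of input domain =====

-- B replaces A's custom hash-table build-and-lookup with a direct nested double loop; same outputs, simpler.


-- ===== PORT A =====
-- Deterministic stand-in for Python's salted str hash: A's result is hash-independent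
-- (the equivalence below holds for the real hash by the same proof), so any fixed hash is exact.
def pvHashA (s : List Char) : Int := s.foldl (fun a c => a * 31 + (c.toNat : Int)) 0

-- Dict.insert: append [key, value] to bucket hash(key) % m
def pvDictInsertA (m : Nat) (table : List (List (List Char × Int))) (key : List Char) (v : Int) :
    List (List (List Char × Int)) :=
  table.modify ((PySem.Int.mod (pvHashA key) (m : Int)).toNat) (fun b => b ++ [(key, v)])

-- Dict.find: scan bucket hash(key) % m, collect values whose key matches
def pvDictFindA (m : Nat) (table : List (List (List Char × Int))) (key : List Char) : List Int :=
  (table.getD ((PySem.Int.mod (pvHashA key) (m : Int)).toNat) []).foldl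
    (fun acc curr => if curr.1 = key then acc ++ [curr.2] else acc) []

def prefix_suffix_overlap_hash1 (lst : List String) (k : Int) : List (Int × Int) :=
  let n := lst.length
  let table := (PySem.List.pyRange 0 (n : Int) 1).foldl
    (fun t i => pvDictInsertA n t (PySem.List.slice (PySem.List.pyGetD lst i "").toList none (some k)) i)
    (List.replicate n [])
  (PySem.List.pyRange 0 (n : Int) 1).foldl
    (fun res j =>
      (pvDictFindA n table (PySem.List.slice (PySem.List.pyGetD lst j "").toList (some (-k)) none)).foldl
        (fun r idx => if idx ≠ j then r ++ [(idx, j)] else r) res)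
    []

-- ===== PORT B =====
def prefix_suffix_overlap_hash1_alt (lst : List String) (k : Int) : List (Int × Int) :=
  (PySem.List.pyRange 0 (lst.length : Int) 1).foldl
    (fun res j =>
      let suffix := PySem.List.slice (PySem.List.pyGetD lst j "").toList (some (-k)) none
      (PySem.List.pyRange 0 (lst.length : Int) 1).foldl
        (fun r i =>
          if i ≠ j ∧ PySem.List.slice (PySem.List.pyGetD lst i "").toList none (some k) = suffix
          then r ++ [(i, j)] else r)
        res)
    []

-- ===== PRECONDITION & SPEC =====
def Spec_prefix_suffix_overlap_hash1 (lst : List String) (k : Int) (out : List (Int × Int)) : Prop := out = prefix_suffix_overlap_hash1_alt lst k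
instance (lst : List String) (k : Int) (out : List (Int × Int)) : Decidable (Spec_prefix_suffix_overlap_hash1 lst k out) := by unfold Spec_prefix_suffix_overlap_hash1; infer_instance

-- ===== CLAIM (what is proved, stated in full; the proofs are below) =====
def Claim_equal_prefix_suffix_overlap_hash1 : Prop := ∀ (lst : List String) (k : Int), Dom_prefix_suffix_overlap_hash1 lst k → Spec_prefix_suffix_overlap_hash1 lst k (prefix_suffix_overlap_hash1 lst k)

-- ===== LEMMAS AND PROOFS =====

theorem pv_insert_length (m : Nat) (t : List (List (List Char × Int))) (key : List Char) (v : Int) :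
    (pvDictInsertA m t key v).length = t.length := by
  simp [pvDictInsertA]

theorem pv_bucket_lt (m : Nat) (hm : 0 < m) (key : List Char) :
    (PySem.Int.mod (pvHashA key) (m : Int)).toNat < m := by
  have h1 := PySem.Int.mod_lt (pvHashA key) (b := (m : Int)) (by exact_mod_cast hm)
  have h2 := PySem.Int.mod_nonneg (pvHashA key) (b := (m : Int)) (by exact_mod_cast hm)
  omega

-- one insert extends find's result by [v] exactly when the inserted key matches
theorem pv_find_insert (m : Nat) (hm : 0 < m) (t : List (List (List Char × Int)))
    (ht : t.length = m) (key s : List Char) (v : Int) :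
    pvDictFindA m (pvDictInsertA m t key v) s
      = pvDictFindA m t s ++ (if key = s then [v] else []) := by
  unfold pvDictFindA pvDictInsertA
  by_cases hb : (PySem.Int.mod (pvHashA key) (m : Int)).toNat = (PySem.Int.mod (pvHashA s) (m : Int)).toNat
  · rw [hb]
    have hlt : (PySem.Int.mod (pvHashA s) (m : Int)).toNat < t.length := by
      rw [ht]; rw [hb] at *; exact pv_bucket_lt m hm s
    have hg : (t.modify (PySem.Int.mod (pvHashA s) (m : Int)).toNat (fun b => b ++ [(key, v)])).getD (PySem.Int.mod (pvHashA s) (m : Int)).toNat [] = t.getD (PySem.Int.mod (pvHashA s) (m : Int)).toNat [] ++ [(key, v)] := by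
      simp [List.getD_eq_getElem?_getD, List.getElem?_eq_getElem hlt]
    rw [hg, List.foldl_append]
    by_cases hk : key = s <;> simp [hk]
  · have hg : (t.modify (PySem.Int.mod (pvHashA key) (m : Int)).toNat (fun b => b ++ [(key, v)])).getD (PySem.Int.mod (pvHashA s) (m : Int)).toNat [] = t.getD (PySem.Int.mod (pvHashA s) (m : Int)).toNat [] := by
      simp [List.getD_eq_getElem?_getD, hb]
    have hk : ¬ key = s := by
      intro h; rw [h] at hb; exact hb rfl
    rw [hg]
    simp [hk]

-- an accumulate-by-append fold starting from init = init ++ the fold from []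
theorem pv_shift {α β : Type} (p : α → Prop) [DecidablePred p] (f : α → β) (L : List α) (init : List β) :
    L.foldl (fun acc x => if p x then acc ++ [f x] else acc) init
      = init ++ L.foldl (fun acc x => if p x then acc ++ [f x] else acc) [] := by
  induction L generalizing init with
  | nil => simp
  | cons x L ih =>
    simp only [List.foldl_cons]
    rw [ih, ih ((if p x then [] ++ [f x] else []))]
    by_cases h : p x <;> simp [h]

-- find after a sequence of inserts = find before ++ the matching values in insertion order
theorem pv_find_foldl (m : Nat) (hm : 0 < m) (L : List (List Char × Int))
    (t : List (List (List Char × Int))) (ht : t.length = m) (s : List Char) :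
    pvDictFindA m (L.foldl (fun t kv => pvDictInsertA m t kv.1 kv.2) t) s
      = pvDictFindA m t s ++ (L.foldl (fun acc kv => if kv.1 = s then acc ++ [kv.2] else acc) []) := by
  induction L generalizing t with
  | nil => simp
  | cons kv L ih =>
    simp only [List.foldl_cons]
    rw [ih (pvDictInsertA m t kv.1 kv.2) (by rw [pv_insert_length]; exact ht),
        pv_find_insert m hm t ht kv.1 s kv.2,
        pv_shift (fun kv : List Char × Int => kv.1 = s) (fun kv => kv.2) L ((if kv.1 = s then [] ++ [kv.2] else []))]
    by_cases hk : kv.1 = s <;> simp [hk]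

-- folding the collected matches (then filtering idx ≠ j) = one combined fold over the indices
theorem pv_fold_matches (L : List Int) (p : Int → Prop) [DecidablePred p] (j : Int)
    (res : List (Int × Int)) :
    (L.foldl (fun acc i => if p i then acc ++ [i] else acc) []).foldl
        (fun r idx => if idx ≠ j then r ++ [(idx, j)] else r) res
      = L.foldl (fun r i => if i ≠ j ∧ p i then r ++ [(i, j)] else r) res := by
  induction L generalizing res with
  | nil => simp
  | cons x L ih =>
    simp only [List.foldl_cons]
    rw [pv_shift p (fun i => i) L ((if p x then [] ++ [x] else [])), List.foldl_append]
    rw [← ih]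
    congr 1
    by_cases hp : p x <;> by_cases hj : x ≠ j <;> simp [hp, hj]

theorem pv_find_empty (m : Nat) (s : List Char) :
    pvDictFindA m (List.replicate m []) s = [] := by
  simp [pvDictFindA, List.getD_eq_getElem?_getD, List.getElem?_replicate]
  split <;> simp

theorem pv_main (lst : List String) (k : Int) :
    prefix_suffix_overlap_hash1 lst k = prefix_suffix_overlap_hash1_alt lst k := by
  unfold prefix_suffix_overlap_hash1 prefix_suffix_overlap_hash1_alt
  by_cases hn : lst.length = 0
  · simp [hn, PySem.List.pyRange_one_eq_nil]
  · have hm : 0 < lst.length := Nat.pos_of_ne_zero hn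
    apply PySem.List.foldl_congr_mem
    intro res j hj
    have htbl :
        pvDictFindA lst.length
          ((PySem.List.pyRange 0 (lst.length : Int) 1).foldl
            (fun t i => pvDictInsertA lst.length t (PySem.List.slice (PySem.List.pyGetD lst i "").toList none (some k)) i)
            (List.replicate lst.length []))
          (PySem.List.slice (PySem.List.pyGetD lst j "").toList (some (-k)) none)
        = (PySem.List.pyRange 0 (lst.length : Int) 1).foldl
            (fun acc i => if PySem.List.slice (PySem.List.pyGetD lst i "").toList none (some k)
                              = PySem.List.slice (PySem.List.pyGetD lst j "").toList (some (-k)) none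
                          then acc ++ [i] else acc) [] := by
      have hmap : (PySem.List.pyRange 0 (lst.length : Int) 1).foldl
            (fun t i => pvDictInsertA lst.length t (PySem.List.slice (PySem.List.pyGetD lst i "").toList none (some k)) i)
            (List.replicate lst.length [])
          = ((PySem.List.pyRange 0 (lst.length : Int) 1).map
              (fun i => (PySem.List.slice (PySem.List.pyGetD lst i "").toList none (some k), i))).foldl
              (fun t kv => pvDictInsertA lst.length t kv.1 kv.2) (List.replicate lst.length []) := by
        rw [List.foldl_map]
      rw [hmap, pv_find_foldl lst.length hm _ _ (by simp), pv_find_empty, List.foldl_map]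
      simp
    rw [htbl, pv_fold_matches]

-- ===== VERDICT (by name: the statement is the Claim_ definition above) =====
theorem prefix_suffix_overlap_hash1_spec : Claim_equal_prefix_suffix_overlap_hash1 := by
  intro lst k _
  unfold Spec_prefix_suffix_overlap_hash1
  exact pv_main lst k
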